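-- pv_equiv track=rewrite | github.com/dsahney/Restaurant-Recommendations | restaurants.py | filter_by_cuisine
-- ===== SOURCE A (Python) =====
-- def filter_by_cuisine(names_matching_price, cuisine_to_names, cuisines_list):
--     """ (list of str, dict of {str: list of str}, list of str) -> list of str
--     >>> names = ['Queen St. Cafe', 'Dumplings R Us', 'Deep Fried Everything']
--     >>> cuis = 'Canadian': ['Georgie Porgie'],
--      'Pub Food': ['Georgie Porgie', 'Deep Fried Everything'],
--      'Malaysian': ['Queen St. Cafe'],
--      'Thai': ['Queen St. Cafe'],
--      'Chinese': ['Dumplings R Us'],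
--      'Mexican': ['Mexican Grill']}
--     >>> cuisines = ['Chinese', 'Thai']
--     >>> filter_by_cuisine(names, cuis, cuisines)
--     ['Queen St. Cafe', 'Dumplings R Us']
--     """
--
--     list_accumulator = []
--     for cuisine in cuisines_list:
--         if cuisine in cuisine_to_names:
--             for name in cuisine_to_names[cuisine]:
--                 if not name in list_accumulator: # or if name not in list_accumulator:
--                     list_accumulator.append(name)
--
--     names_final = []
--     for x in names_matching_price:
--         if x in list_accumulator:
--             names_final.append(x)
--
--     return names_final
-- ===== SOURCE B (Python) =====
-- def filter_by_cuisine(names_matching_price, cuisine_to_names, cuisines_list):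
--     return [name for name in names_matching_price
--             if any(name in cuisine_to_names.get(c, []) for c in cuisines_list)]
-- ===== Notes on version B (the rewrite author's own statement) =====
-- stated objective: simpler
-- what changed: Drops A's deduplicated accumulator list entirely: B loops over the candidate names and for each one scans the cuisines with any(), testing membership directly in the dict's name lists, so no intermediate table is built.
import Mathlib
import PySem

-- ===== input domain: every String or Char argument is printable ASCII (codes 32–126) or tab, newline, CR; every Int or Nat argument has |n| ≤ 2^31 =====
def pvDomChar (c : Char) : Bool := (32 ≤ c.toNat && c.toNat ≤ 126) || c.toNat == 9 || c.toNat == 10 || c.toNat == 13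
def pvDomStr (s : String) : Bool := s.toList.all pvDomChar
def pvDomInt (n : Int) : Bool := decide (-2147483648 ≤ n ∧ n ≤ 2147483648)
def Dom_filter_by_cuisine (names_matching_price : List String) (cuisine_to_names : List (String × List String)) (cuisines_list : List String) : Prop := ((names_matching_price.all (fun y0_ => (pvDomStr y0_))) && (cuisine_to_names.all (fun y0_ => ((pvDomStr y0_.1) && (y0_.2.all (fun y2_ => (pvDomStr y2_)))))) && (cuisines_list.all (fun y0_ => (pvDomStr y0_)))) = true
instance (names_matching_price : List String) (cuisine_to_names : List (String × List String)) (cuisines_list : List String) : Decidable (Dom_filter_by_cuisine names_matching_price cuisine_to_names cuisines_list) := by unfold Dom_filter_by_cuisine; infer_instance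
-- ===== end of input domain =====

-- B replaces A's deduplicated accumulator table with a direct scan: for each candidate
-- name, `any` over the cuisines tests membership in the dict's list (objective: simpler).

-- ===== PORT A =====
-- 'cuisine in cuisine_to_names' followed by 'cuisine_to_names[cuisine]' is ported as one
-- first-match lookup (List.lookup), matched on: some = key present, none = absent.
def filter_by_cuisine (names_matching_price : List String) (cuisine_to_names : List (String × List String)) (cuisines_list : List String) : List String :=
  let list_accumulator := cuisines_list.foldl (fun acc cuisine =>
    match cuisine_to_names.lookup cuisine with
    | some names => names.foldl (fun acc name => if name ∈ acc then acc else acc ++ [name]) acc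
    | none => acc) []
  names_matching_price.foldl (fun nf x => if x ∈ list_accumulator then nf ++ [x] else nf) []

-- ===== PORT B =====
-- Source B's comprehension with any(); 'cuisine_to_names.get(c, [])' is (lookup c).getD [].
def filter_by_cuisine_alt (names_matching_price : List String) (cuisine_to_names : List (String × List String)) (cuisines_list : List String) : List String :=
  names_matching_price.filter (fun name =>
    cuisines_list.any (fun c => ((cuisine_to_names.lookup c).getD []).contains name))

-- ===== PRECONDITION & SPEC =====
def Spec_filter_by_cuisine (names_matching_price : List String) (cuisine_to_names : List (String × List String)) (cuisines_list : List String) (out : List String) : Prop := out = filter_by_cuisine_alt names_matching_price cuisine_to_names cuisines_list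
instance (names_matching_price : List String) (cuisine_to_names : List (String × List String)) (cuisines_list : List String) (out : List String) : Decidable (Spec_filter_by_cuisine names_matching_price cuisine_to_names cuisines_list out) := by unfold Spec_filter_by_cuisine; infer_instance

-- ===== CLAIM (what is proved, stated in full; the proofs are below) =====
def Claim_equal_filter_by_cuisine : Prop := ∀ (names_matching_price : List String) (cuisine_to_names : List (String × List String)) (cuisines_list : List String), Dom_filter_by_cuisine names_matching_price cuisine_to_names cuisines_list → Spec_filter_by_cuisine names_matching_price cuisine_to_names cuisines_list (filter_by_cuisine names_matching_price cuisine_to_names cuisines_list)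

-- ===== LEMMAS AND PROOFS =====

-- membership in A's inner dedup-append loop
theorem mem_dedup_foldl (names : List String) (acc : List String) (x : String) :
    x ∈ names.foldl (fun acc name => if name ∈ acc then acc else acc ++ [name]) acc ↔
      x ∈ acc ∨ x ∈ names := by
  induction names generalizing acc with
  | nil => simp
  | cons n ns ih =>
    simp only [List.foldl_cons]
    by_cases h : n ∈ acc
    · simp only [if_pos h, ih, List.mem_cons]
      constructor
      · tauto
      · rintro (h' | h' | h')
        · exact Or.inl h'
        · exact Or.inl (h' ▸ h)
        · exact Or.inr h'
    · simp only [if_neg h, ih, List.mem_append, List.mem_cons]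
      tauto

-- membership in A's accumulator over the cuisines
theorem mem_acc_foldl (ctn : List (String × List String)) (cl : List String) (acc : List String) (x : String) :
    x ∈ cl.foldl (fun acc cuisine =>
        match ctn.lookup cuisine with
        | some names => names.foldl (fun acc name => if name ∈ acc then acc else acc ++ [name]) acc
        | none => acc) acc ↔
      x ∈ acc ∨ ∃ c ∈ cl, ∃ ns, ctn.lookup c = some ns ∧ x ∈ ns := by
  induction cl generalizing acc with
  | nil => simp
  | cons c cs ih =>
    simp only [List.foldl_cons]
    cases h : ctn.lookup c with
    | none =>
      rw [ih]
      constructor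
      · rintro (h' | ⟨c', hc', hns⟩)
        · tauto
        · exact Or.inr ⟨c', List.mem_cons_of_mem _ hc', hns⟩
      · rintro (h' | ⟨c', hc', ns, hl, hx⟩)
        · tauto
        · rcases List.mem_cons.mp hc' with rfl | hc'
          · rw [h] at hl; cases hl
          · exact Or.inr ⟨c', hc', ns, hl, hx⟩
    | some ns =>
      rw [ih, mem_dedup_foldl]
      constructor
      · rintro ((h' | h') | ⟨c', hc', hns⟩)
        · tauto
        · exact Or.inr ⟨c, List.mem_cons_self, ns, h, h'⟩
        · exact Or.inr ⟨c', List.mem_cons_of_mem _ hc', hns⟩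
      · rintro (h' | ⟨c', hc', ns', hl, hx⟩)
        · tauto
        · rcases List.mem_cons.mp hc' with rfl | hc'
          · rw [h] at hl; injection hl with e; subst e; exact Or.inl (Or.inr hx)
          · exact Or.inr ⟨c', hc', ns', hl, hx⟩

-- A's second loop is a filter
theorem foldl_filter_append (l : List String) (p : String → Prop) [DecidablePred p] (init : List String) :
    l.foldl (fun nf x => if p x then nf ++ [x] else nf) init =
      init ++ l.filter (fun x => decide (p x)) := by
  induction l generalizing init with
  | nil => simp
  | cons y ys ih =>
    simp only [List.foldl_cons, List.filter_cons]
    by_cases h : p y <;> simp [h, ih]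

-- ===== VERDICT (by name: the statement is the Claim_ definition above) =====
theorem filter_by_cuisine_spec : Claim_equal_filter_by_cuisine := by
  intro nmp ctn cl _
  unfold Spec_filter_by_cuisine filter_by_cuisine filter_by_cuisine_alt
  rw [foldl_filter_append]
  simp only [List.nil_append]
  apply List.filter_congr
  intro x _
  rw [Bool.eq_iff_iff, decide_eq_true_iff, mem_acc_foldl]
  simp only [List.mem_nil_iff, false_or, List.any_eq_true]
  constructor
  · rintro ⟨c, hc, ns, hl, hx⟩
    exact ⟨c, hc, by simp [hl, hx]⟩
  · rintro ⟨c, hc, hb⟩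
    cases h : ctn.lookup c with
    | none => rw [h] at hb; simp at hb
    | some ns =>
      rw [h] at hb
      simp only [Option.getD_some, List.contains_iff_mem] at hb
      exact ⟨c, hc, ns, h, by exact_mod_cast hb⟩
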